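-- pv_equiv track=rewrite | github.com/sony/nnabla-c-runtime | build-tools/code-generator/generators/generator_doc_SUPPORT_STATUS_md.py | search_function_ancestor
-- ===== SOURCE A (Python) =====
-- def search_function_ancestor(func_name, functions):
--     ancestor = None
--     matched = []
--     for fn in functions:
--         fn_s = fn.split('_')
--         func_name_s = func_name.split('_')
--         if fn_s == func_name_s[:len(fn_s)]:
--             matched.append(fn)
--     if len(matched) > 0:
--         ancestor = sorted(matched).pop()
--         return ancestor, func_name_s[len(ancestor.split('_')):]
-- ===== SOURCE B (Python) =====
-- def search_function_ancestor(func_name, functions):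
--     parts = func_name.split('_')
--     for fn in sorted(functions, reverse=True):
--         fn_s = fn.split('_')
--         if fn_s == parts[:len(fn_s)]:
--             return fn, parts[len(fn_s):]
--     return None
-- ===== Notes on version B (the rewrite author's own statement) =====
-- stated objective: simpler
-- what changed: Instead of collecting all matching prefixes into a list and then sorting it to pop the maximum, B scans the functions once in descending sorted order and returns the first match, maintaining no intermediate list.
import Mathlib
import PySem

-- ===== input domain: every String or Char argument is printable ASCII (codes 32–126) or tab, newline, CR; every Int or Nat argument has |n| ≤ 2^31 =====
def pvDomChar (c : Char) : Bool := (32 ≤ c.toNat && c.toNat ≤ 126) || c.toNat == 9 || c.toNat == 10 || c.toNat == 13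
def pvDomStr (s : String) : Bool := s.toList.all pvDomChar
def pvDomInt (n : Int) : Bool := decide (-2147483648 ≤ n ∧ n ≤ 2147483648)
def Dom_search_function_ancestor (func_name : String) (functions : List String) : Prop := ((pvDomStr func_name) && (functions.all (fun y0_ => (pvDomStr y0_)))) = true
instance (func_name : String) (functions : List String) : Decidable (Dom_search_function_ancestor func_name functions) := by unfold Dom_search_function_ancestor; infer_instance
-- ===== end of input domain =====

-- B replaces "collect all matching prefixes, sort, pop the max" by a single scan of the
-- functions in descending sorted order returning the first match (objective: simpler).

-- s.split('_'); the separator "_" is nonempty, so PySem.Str.split? never returns none and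
-- the .getD [] default is never used (exact on all inputs).
def pySplitU (s : String) : List String := (PySem.Str.split? s "_").getD []

-- ===== PORT A =====
def search_function_ancestor (func_name : String) (functions : List String) : Option (String × List String) :=
  -- ancestor = None; matched = []; for fn in functions: … append …
  let matched := functions.foldl (fun acc fn =>
    let fn_s := pySplitU fn
    let func_name_s := pySplitU func_name
    if fn_s == PySem.List.slice func_name_s none (some (fn_s.length : Int)) then acc ++ [fn]
    else acc) []
  if matched.length > 0 then
    match PySem.List.pop? (PySem.List.sorted matched (fun x => x) false) (-1) with
    | some (ancestor, _) =>
        some (ancestor,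
          PySem.List.slice (pySplitU func_name) (some ((pySplitU ancestor).length : Int)) none)
    | none => none   -- unreachable: matched nonempty
  else none

-- ===== PORT B =====
-- the for-loop of Source B with its early return
def sfaFirst (parts : List String) : List String → Option (String × List String)
  | [] => none
  | fn :: rest =>
      let fn_s := pySplitU fn
      if fn_s == PySem.List.slice parts none (some (fn_s.length : Int)) then
        some (fn, PySem.List.slice parts (some (fn_s.length : Int)) none)
      else sfaFirst parts rest

def search_function_ancestor_alt (func_name : String) (functions : List String) : Option (String × List String) :=
  let parts := pySplitU func_name
  sfaFirst parts (PySem.List.sorted functions (fun x => x) true)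

-- ===== PRECONDITION & SPEC =====
def Spec_search_function_ancestor (func_name : String) (functions : List String) (out : Option (String × List String)) : Prop := out = search_function_ancestor_alt func_name functions
instance (func_name : String) (functions : List String) (out : Option (String × List String)) : Decidable (Spec_search_function_ancestor func_name functions out) := by unfold Spec_search_function_ancestor; infer_instance

-- ===== CLAIM (what is proved, stated in full; the proofs are below) =====
def Claim_equal_search_function_ancestor : Prop := ∀ (func_name : String) (functions : List String), Dom_search_function_ancestor func_name functions → Spec_search_function_ancestor func_name functions (search_function_ancestor func_name functions)

-- ===== LEMMAS AND PROOFS =====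

-- the match predicate shared by the analysis
def sfaP (parts : List String) (fn : String) : Bool :=
  (pySplitU fn == List.take (pySplitU fn).length parts)

theorem sfaFirst_eq_find (parts : List String) (l : List String) :
    sfaFirst parts l = (l.find? (sfaP parts)).map
      (fun fn => (fn, parts.drop (pySplitU fn).length)) := by
  induction l with
  | nil => rfl
  | cons x xs ih =>
      simp only [sfaFirst, sfaP, List.find?, PySem.List.slice_to_natCast,
        PySem.List.slice_from_natCast]
      by_cases h : (pySplitU x == List.take (pySplitU x).length parts) = true
      · simp [h]
      · simp [h, ih]

-- in a descending-sorted list, the first element found satisfying p is ≥ every satisfying element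
theorem find?_desc_ge {l : List String} (hp : l.Pairwise (fun a b => b ≤ a))
    {p : String → Bool} {m : String} (hm : l.find? p = some m) :
    ∀ x ∈ l, p x = true → x ≤ m := by
  induction l with
  | nil => simp at hm
  | cons y ys ih =>
      rcases List.pairwise_cons.mp hp with ⟨hy, hys⟩
      by_cases hpy : p y = true
      · rw [List.find?_cons_of_pos hpy] at hm
        injection hm with hm
        subst hm
        intro x hx _
        rcases List.mem_cons.mp hx with rfl | hx
        · exact le_refl _
        · exact hy x hx
      · rw [List.find?_cons_of_neg hpy] at hm
        intro x hx hpx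
        rcases List.mem_cons.mp hx with rfl | hx
        · exact absurd hpx hpy
        · exact ih hys hm x hx hpx

-- the last element of an ascending-sorted list is ≥ every element
theorem getLast_asc_ge {l : List String} (hp : l.Pairwise (fun a b => a ≤ b))
    {m : String} (hm : l.getLast? = some m) : ∀ x ∈ l, x ≤ m := by
  induction l with
  | nil => simp at hm
  | cons y ys ih =>
      rcases List.pairwise_cons.mp hp with ⟨hy, hys⟩
      cases ys with
      | nil =>
          simp at hm; subst hm; simp
      | cons z zs =>
          rw [List.getLast?_cons_cons] at hm
          intro x hx
          rcases List.mem_cons.mp hx with rfl | hx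
          · exact le_trans (hy z (by simp)) (ih hys hm z (by simp))
          · exact ih hys hm x hx
  
theorem matched_eq (func_name : String) (functions : List String) :
    functions.foldl (fun acc fn =>
      let fn_s := pySplitU fn
      let func_name_s := pySplitU func_name
      if fn_s == PySem.List.slice func_name_s none (some (fn_s.length : Int)) then acc ++ [fn]
      else acc) [] = functions.filter (sfaP (pySplitU func_name)) := by
  simp only [PySem.List.slice_to_natCast]
  exact (PySem.List.foldl_append_if_eq_filter (sfaP (pySplitU func_name)) functions []).trans
    (List.nil_append _)

-- ===== VERDICT (by name: the statement is the Claim_ definition above) =====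
theorem search_function_ancestor_spec : Claim_equal_search_function_ancestor := by
  intro func_name functions _
  unfold Spec_search_function_ancestor search_function_ancestor search_function_ancestor_alt
  simp only [matched_eq, sfaFirst_eq_find]
  by_cases hF : functions.filter (sfaP (pySplitU func_name)) = []
  · -- no function matches: both sides are none
    rw [hF]
    have hfind : (PySem.List.sorted functions (fun x => x) true).find?
        (sfaP (pySplitU func_name)) = none := by
      rw [List.find?_eq_none]
      intro x hx hpx
      have hx' : x ∈ functions := (PySem.List.mem_sorted functions _ true x).mp hx
      have : x ∈ functions.filter (sfaP (pySplitU func_name)) :=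
        List.mem_filter.mpr ⟨hx', hpx⟩
      simp [hF] at this
    simp [hfind]
  · -- some function matches
    rcases (PySem.List.sorted (functions.filter (sfaP (pySplitU func_name)))
        (fun x => x) false).eq_nil_or_concat with hnil | ⟨ys, m, hs⟩
    · exact absurd ((PySem.List.sorted_eq_nil_iff _ _ _).mp hnil) hF
    rw [List.concat_eq_append] at hs
    -- facts about m, the max of the matching functions
    have hlen : 0 < (functions.filter (sfaP (pySplitU func_name))).length :=
      List.length_pos_iff.mpr hF
    have hmM : m ∈ functions.filter (sfaP (pySplitU func_name)) := by
      have : m ∈ PySem.List.sorted (functions.filter (sfaP (pySplitU func_name)))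
          (fun x => x) false := by simp [hs]
      exact (PySem.List.mem_sorted _ _ _ m).mp this
    have hmP : sfaP (pySplitU func_name) m = true := (List.mem_filter.mp hmM).2
    have hmfn : m ∈ functions := (List.mem_filter.mp hmM).1
    have hmax : ∀ x ∈ functions.filter (sfaP (pySplitU func_name)), x ≤ m := by
      intro x hx
      refine getLast_asc_ge
        (PySem.List.sorted_pairwise (functions.filter (sfaP (pySplitU func_name)))
          (fun x : String => x)) ?_ x ((PySem.List.mem_sorted (functions.filter (sfaP (pySplitU func_name))) (fun x : String => x) false x).mpr hx)
      rw [hs]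
      simp
    -- the find? on the B side succeeds, at some m'
    have hmem_rev : m ∈ PySem.List.sorted functions (fun x => x) true :=
      (PySem.List.mem_sorted functions _ true m).mpr hmfn
    have hfindne : (PySem.List.sorted functions (fun x => x) true).find?
        (sfaP (pySplitU func_name)) ≠ none := by
      intro hnone
      rw [List.find?_eq_none] at hnone
      exact absurd hmP (hnone m hmem_rev)
    rcases Option.ne_none_iff_exists'.mp hfindne with ⟨m', hm'⟩
    have hm'P : sfaP (pySplitU func_name) m' = true := List.find?_some hm'
    have hm'fn : m' ∈ functions :=
      (PySem.List.mem_sorted functions _ true m').mp (List.mem_of_find?_eq_some hm')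
    have hm'M : m' ∈ functions.filter (sfaP (pySplitU func_name)) :=
      List.mem_filter.mpr ⟨hm'fn, hm'P⟩
    have heq : m = m' :=
      le_antisymm
        (find?_desc_ge (PySem.List.sorted_pairwise_rev functions (fun x => x)) hm'
          m hmem_rev hmP)
        (hmax m' hm'M)
    -- assemble both sides
    rw [hs, PySem.List.pop?_last, hm', if_pos (by simpa using hlen)]
    simp [heq, PySem.List.slice_from_natCast]
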